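-- pv_equiv track=rewrite | github.com/Faitltd/FAIT | FAIT 2.0/Master Project/Home-Depot-Scraper-main/bigbox_api_client/utils.py | group_specifications
-- ===== SOURCE A (Python) =====
-- from typing import Dict, List, Optional, Any, Union
--
-- def group_specifications(specifications: List[Dict[str, str]]) -> Dict[str, Dict[str, str]]:
--     """
--     Group product specifications by their group name for easier access.
--
--     Args:
--         specifications (List[Dict[str, str]]): List of specification dictionaries
--
--     Returns:
--         Dict[str, Dict[str, str]]: Specifications grouped by category
--     """
--     grouped = {}
--
--     for spec in specifications:
--         group = spec.get('group_name', 'Other')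
--         name = spec.get('name', '')
--         value = spec.get('value', '')
--
--         if group not in grouped:
--             grouped[group] = {}
--
--         grouped[group][name] = value
--
--     return grouped
-- ===== SOURCE B (Python) =====
-- def group_specifications(specifications):
--     """
--     Group product specifications by their group name for easier access.
--     Two-pass version: first collect the group names in first-occurrence order,
--     then build each inner dict with a comprehension over the matching specs.
--     """
--     order = dict.fromkeys(spec.get('group_name', 'Other') for spec in specifications)
--     return {
--         g: {spec.get('name', ''): spec.get('value', '')
--             for spec in specifications if spec.get('group_name', 'Other') == g}
--         for g in order
--     }
-- ===== Notes on version B (the rewrite author's own statement) =====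
-- stated objective: alternative
-- what changed: Replaced the single-pass mutable dict-of-dicts accumulation with a two-pass declarative version: first dedup the group names in first-occurrence order, then build each group's inner dict with a filtering comprehension over the whole list.
import Mathlib
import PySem

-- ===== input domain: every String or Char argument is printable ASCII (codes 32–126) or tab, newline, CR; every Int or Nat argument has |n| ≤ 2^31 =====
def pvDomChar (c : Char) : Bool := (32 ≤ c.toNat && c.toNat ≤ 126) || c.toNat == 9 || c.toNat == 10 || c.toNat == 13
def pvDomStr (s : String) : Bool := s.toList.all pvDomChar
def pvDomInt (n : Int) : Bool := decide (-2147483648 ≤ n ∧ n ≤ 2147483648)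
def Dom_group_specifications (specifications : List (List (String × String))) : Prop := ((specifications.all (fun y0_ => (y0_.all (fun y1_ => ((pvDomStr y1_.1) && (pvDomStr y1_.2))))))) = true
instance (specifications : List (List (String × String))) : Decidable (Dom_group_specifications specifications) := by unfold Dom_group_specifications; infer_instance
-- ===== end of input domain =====

-- B replaces A's single-pass mutable dict-of-dicts build by a two-pass version
-- (dedup of group names, then one filtering pass per group); alternative decomposition, not faster.


-- ===== PORT A =====
-- spec.get('group_name', 'Other') etc., first-match lookup on the association list
def pvGroupOf (spec : List (String × String)) : String :=
  (PySem.Dict.mk spec).getD "group_name" "Other"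
def pvNameOf (spec : List (String × String)) : String :=
  (PySem.Dict.mk spec).getD "name" ""
def pvValueOf (spec : List (String × String)) : String :=
  (PySem.Dict.mk spec).getD "value" ""

-- one iteration of A's loop: "if group not in grouped: grouped[group] = {}" is setdefault;
-- "grouped[group][name] = value" is modify at the (now present) key
def pvStepA (grouped : PySem.Dict String (PySem.Dict String String))
    (spec : List (String × String)) : PySem.Dict String (PySem.Dict String String) :=
  let group := pvGroupOf spec
  (grouped.setdefault group PySem.Dict.empty).modify group PySem.Dict.empty
    (fun inner => inner.insert (pvNameOf spec) (pvValueOf spec))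

def group_specifications (specifications : List (List (String × String))) :
    List (String × List (String × String)) :=
  ((specifications.foldl pvStepA PySem.Dict.empty).items).map (fun p => (p.1, p.2.items))

-- ===== PORT B =====
-- the inner dict comprehension for one group g
def pvInnerB (specifications : List (List (String × String))) (g : String) :
    PySem.Dict String String :=
  specifications.foldl
    (fun inner spec =>
      if pvGroupOf spec == g then inner.insert (pvNameOf spec) (pvValueOf spec) else inner)
    PySem.Dict.empty

def group_specifications_alt (specifications : List (List (String × String))) :
    List (String × List (String × String)) :=
  (PySem.List.dedup (specifications.map pvGroupOf)).map
    (fun g => (g, (pvInnerB specifications g).items))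

-- ===== PRECONDITION & SPEC =====
def Spec_group_specifications (specifications : List (List (String × String))) (out : List (String × List (String × String))) : Prop := out = group_specifications_alt specifications
instance (specifications : List (List (String × String))) (out : List (String × List (String × String))) : Decidable (Spec_group_specifications specifications out) := by unfold Spec_group_specifications; infer_instance

-- ===== CLAIM (what is proved, stated in full; the proofs are below) =====
def Claim_equal_group_specifications : Prop := ∀ (specifications : List (List (String × String))), Dom_group_specifications specifications → Spec_group_specifications specifications (group_specifications specifications)

-- ===== LEMMAS AND PROOFS =====

-- one step of A's loop, seen through getD
theorem pvGetD_stepA (d : PySem.Dict String (PySem.Dict String String))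
    (s : List (String × String)) (g : String) :
    (pvStepA d s).getD g PySem.Dict.empty
      = if pvGroupOf s = g
          then (d.getD g PySem.Dict.empty).insert (pvNameOf s) (pvValueOf s)
          else d.getD g PySem.Dict.empty := by
  unfold pvStepA
  by_cases h : pvGroupOf s = g
  · subst h
    rw [if_pos rfl, PySem.Dict.getD_modify_self, PySem.Dict.getD_setdefault_self]
  · rw [if_neg h, PySem.Dict.getD_modify, if_neg (fun hg => h hg.symm),
      PySem.Dict.getD_eq_get?_getD,
      PySem.Dict.get?_setdefault_of_ne _ _ (fun hg => h hg.symm),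
      ← PySem.Dict.getD_eq_get?_getD]

-- one step of A's loop, seen through keys
theorem pvKeys_stepA (d : PySem.Dict String (PySem.Dict String String))
    (s : List (String × String)) :
    (pvStepA d s).keys
      = if d.contains (pvGroupOf s) then d.keys else d.keys ++ [pvGroupOf s] := by
  unfold pvStepA
  rw [PySem.Dict.keys_modify]
  by_cases hc : d.contains (pvGroupOf s) = true
  · rw [if_pos hc, PySem.Dict.setdefault_of_contains _ _ hc,
      PySem.Dict.keys_insert_of_contains _ _ hc]
  · have hc' : d.contains (pvGroupOf s) = false := Bool.eq_false_iff.mpr hc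
    rw [if_neg (by simp [hc']), PySem.Dict.setdefault_of_not_contains _ _ hc',
      PySem.Dict.keys_insert_of_contains _ _ (PySem.Dict.contains_insert_self _ _ _),
      PySem.Dict.keys_insert_of_not_contains _ _ hc']

-- one step of B's inner comprehension
theorem pvInnerB_append (l : List (List (String × String))) (s : List (String × String))
    (g : String) :
    pvInnerB (l ++ [s]) g
      = if pvGroupOf s = g
          then (pvInnerB l g).insert (pvNameOf s) (pvValueOf s)
          else pvInnerB l g := by
  unfold pvInnerB
  rw [List.foldl_append]
  simp [beq_iff_eq]

-- the keys of A's accumulator are the deduped group names, in first-occurrence order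
theorem pvKeysA (specifications : List (List (String × String))) :
    (specifications.foldl pvStepA PySem.Dict.empty).keys
      = PySem.List.dedup (specifications.map pvGroupOf) := by
  induction specifications using List.reverseRecOn with
  | nil => rfl
  | append_singleton l s ih =>
    rw [List.foldl_append, List.map_append, PySem.List.dedup_eq_ofList] at *
    simp only [List.foldl_cons, List.foldl_nil, List.map_cons, List.map_nil,
      PySem.Set.ofList_append_singleton]
    rw [pvKeys_stepA]
    by_cases hc : (l.foldl pvStepA PySem.Dict.empty).contains (pvGroupOf s) = true
    · have hm : pvGroupOf s ∈ PySem.Set.ofList (l.map pvGroupOf) := by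
        rw [← ih]; exact (PySem.Dict.contains_iff_mem_keys _ _).mp hc
      rw [if_pos hc, PySem.Set.add_of_mem hm, ih]
    · have hm : pvGroupOf s ∉ PySem.Set.ofList (l.map pvGroupOf) := by
        rw [← ih]; intro h
        exact hc ((PySem.Dict.contains_iff_mem_keys _ _).mpr h)
      rw [if_neg (by simpa using hc), PySem.Set.add_of_not_mem hm, ih]

-- every lookup in A's accumulator is B's inner comprehension
theorem pvGetDA (specifications : List (List (String × String))) (g : String) :
    (specifications.foldl pvStepA PySem.Dict.empty).getD g PySem.Dict.empty
      = pvInnerB specifications g := by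
  induction specifications using List.reverseRecOn with
  | nil => rfl
  | append_singleton l s ih =>
    rw [List.foldl_append]
    simp only [List.foldl_cons, List.foldl_nil]
    rw [pvGetD_stepA, pvInnerB_append, ih]

-- ===== VERDICT (by name: the statement is the Claim_ definition above) =====
theorem group_specifications_spec : Claim_equal_group_specifications := by
  intro specs _
  unfold Spec_group_specifications group_specifications group_specifications_alt
  have hnd : (specs.foldl pvStepA PySem.Dict.empty).keys.Nodup := by
    rw [pvKeysA, PySem.List.dedup_eq_ofList]; exact PySem.Set.nodup_ofList _
  rw [PySem.Dict.items_eq_map_keys _ hnd PySem.Dict.empty, List.map_map, pvKeysA]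
  refine List.map_congr_left (fun g _ => ?_)
  simp [pvGetDA]
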